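-- pv_equiv track=rewrite | github.com/Protonk/sandbox-boostrap | book/tools/preflight/gate_minimizer.py | _tokenize_sbpl
-- ===== SOURCE A (Python) =====
-- from typing import Any, Callable, Dict, Iterable, List, Optional, Sequence, Tuple, Union
--
-- def _tokenize_sbpl(text: str) -> List[str]:
--     """
--     Tokenize SBPL into:
--     - "(" and ")"
--     - atoms (symbols/numbers/etc)
--     - strings (including quotes and escapes)
--
--     Supported comments:
--     - ';' to end-of-line
--     - '#| ... |#' block comments (best-effort)
--     """
--
--     tokens: List[str] = []
--     i = 0
--     in_line_comment = False
--     in_block_comment = False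
--     n = len(text)
--
--     while i < n:
--         ch = text[i]
--
--         if in_line_comment:
--             if ch == "\n":
--                 in_line_comment = False
--             i += 1
--             continue
--
--         if in_block_comment:
--             if text.startswith("|#", i):
--                 in_block_comment = False
--                 i += 2
--                 continue
--             i += 1
--             continue
--
--         if text.startswith("#|", i):
--             in_block_comment = True
--             i += 2
--             continue
--
--         if ch.isspace():
--             i += 1
--             continue
--
--         if ch == ";":
--             in_line_comment = True
--             i += 1
--             continue
--
--         if ch in ("(", ")"):
--             tokens.append(ch)
--             i += 1
--             continue
--
--         if ch == '"':
--             start = i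
--             i += 1
--             while i < n:
--                 if text[i] == "\\":
--                     i += 2
--                     continue
--                 if text[i] == '"':
--                     i += 1
--                     break
--                 i += 1
--             tokens.append(text[start:i])
--             continue
--
--         # atom
--         start = i
--         while i < n:
--             ch2 = text[i]
--             if ch2.isspace() or ch2 in ("(", ")", ";"):
--                 break
--             if text.startswith("#|", i):
--                 break
--             i += 1
--         if start == i:
--             # Defensive: avoid infinite loops on unexpected chars.
--             i += 1
--             continue
--         tokens.append(text[start:i])
--
--     return tokens
-- ===== SOURCE B (Python) =====
-- from typing import List, Optional
--
--
-- def _match_block_comment(text: str, i: int) -> Optional[int]: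
--     if text.startswith("#|", i):
--         j = text.find("|#", i + 2)
--         return len(text) if j == -1 else j + 2
--     return None
--
--
-- def _match_line_comment(text: str, i: int) -> Optional[int]:
--     if text[i] == ";":
--         j = text.find("\n", i)
--         return len(text) if j == -1 else j + 1
--     return None
--
--
-- def _match_space(text: str, i: int) -> Optional[int]:
--     return i + 1 if text[i].isspace() else None
--
--
-- def _match_paren(text: str, i: int) -> Optional[int]:
--     return i + 1 if text[i] in "()" else None
--
--
-- def _match_string(text: str, i: int) -> Optional[int]:
--     if text[i] != '"':
--         return None
--     j = i + 1
--     n = len(text)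
--     while j < n:
--         if text[j] == "\\":
--             j += 2
--         elif text[j] == '"':
--             j += 1
--             break
--         else:
--             j += 1
--     return j
--
--
-- def _match_atom(text: str, i: int) -> Optional[int]:
--     j = i
--     n = len(text)
--     while j < n:
--         c = text[j]
--         if c.isspace() or c in "();" or text.startswith("#|", j):
--             break
--         j += 1
--     return j if j > i else None
--
--
-- # Ordered scanner rules: (matcher, emit-token?). Exactly one always applies.
-- _RULES = (
--     (_match_block_comment, False),
--     (_match_line_comment, False),
--     (_match_space, False),
--     (_match_paren, True),
--     (_match_string, True),
--     (_match_atom, True),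
-- )
--
--
-- def _tokenize_sbpl(text: str) -> List[str]:
--     tokens: List[str] = []
--     i = 0
--     n = len(text)
--     while i < n:
--         for matcher, emit in _RULES:
--             j = matcher(text, i)
--             if j is not None:
--                 if emit:
--                     tokens.append(text[i:j])
--                 i = j
--                 break
--     return tokens
-- ===== Notes on version B (the rewrite author's own statement) =====
-- stated objective: alternative
-- what changed: Replaced the manual index loop with in_line_comment/in_block_comment boolean flags by a table-driven scanner: an ordered tuple of matcher rules (block comment, line comment, whitespace, paren, string, atom), each returning the end of its match, with the main loop just applying the first matching rule and emitting the slice when the rule is token-producing.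
import Mathlib
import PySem

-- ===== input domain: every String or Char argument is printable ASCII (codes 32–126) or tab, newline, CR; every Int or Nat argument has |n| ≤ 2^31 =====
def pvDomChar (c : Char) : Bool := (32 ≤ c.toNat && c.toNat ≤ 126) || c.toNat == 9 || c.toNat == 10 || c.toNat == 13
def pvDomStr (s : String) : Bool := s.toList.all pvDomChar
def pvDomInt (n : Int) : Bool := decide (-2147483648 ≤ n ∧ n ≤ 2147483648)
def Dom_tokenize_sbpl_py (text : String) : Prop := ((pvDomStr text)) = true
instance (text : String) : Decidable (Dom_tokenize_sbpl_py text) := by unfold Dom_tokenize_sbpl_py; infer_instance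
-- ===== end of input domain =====

-- B replaces A's flag-based index state machine by a table-driven scanner (ordered matcher
-- rules applied at each position); alternative decomposition, same linear cost.

-- ===== PORT A =====
-- A's inner string loop (chars after the opening quote): backslash skips two, quote closes.
def strScanA : List Char → List Char × List Char
  | [] => ([], [])
  | c :: r =>
    if c == '\\' then
      match r with
      | [] => (['\\'], [])
      | c2 :: r2 => ('\\' :: c2 :: (strScanA r2).1, (strScanA r2).2)
    else if c == '"' then (['"'], r)
    else (c :: (strScanA r).1, (strScanA r).2)

-- A's atom loop: stop at whitespace, parens, ';' or a "#|" opener.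
def atomScanA : List Char → List Char × List Char
  | [] => ([], [])
  | c :: r =>
    if PySem.Chars.isspace c || c == '(' || c == ')' || c == ';' then ([], c :: r)
    else if c == '#' && r.head? == some '|' then ([], c :: r)
    else (c :: (atomScanA r).1, (atomScanA r).2)

theorem strScanA_append : ∀ cs : List Char, (strScanA cs).1 ++ (strScanA cs).2 = cs := by
  intro cs
  fun_induction strScanA cs <;> simp_all

theorem atomScanA_append : ∀ cs : List Char, (atomScanA cs).1 ++ (atomScanA cs).2 = cs := by
  intro cs
  fun_induction atomScanA cs <;> simp_all

theorem strScanA_snd_le (cs : List Char) : (strScanA cs).2.length ≤ cs.length := by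
  have h := strScanA_append cs
  have := congrArg List.length h
  simp [List.length_append] at this
  omega

-- the main loop of A, with its two comment flags, as structural recursion on the remaining text
def tokA : List Char → Bool → Bool → List String
  | [], _, _ => []
  | c :: r, true, inBlock => tokA r (!(c == '\n')) inBlock
  | c :: r, false, true =>
    if c == '|' && r.head? == some '#' then tokA (r.drop 1) false false
    else tokA r false true
  | c :: r, false, false =>
    if c == '#' && r.head? == some '|' then tokA (r.drop 1) false true
    else if PySem.Chars.isspace c then tokA r false false
    else if c == ';' then tokA r true false
    else if c == '(' || c == ')' then String.ofList [c] :: tokA r false false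
    else if c == '"' then
      String.ofList ('"' :: (strScanA r).1) :: tokA (strScanA r).2 false false
    else
      if (atomScanA (c :: r)).1 = [] then tokA r false false   -- A's defensive branch
      else String.ofList (atomScanA (c :: r)).1 :: tokA (atomScanA (c :: r)).2 false false
termination_by cs _ _ => cs.length
decreasing_by
  all_goals simp only [List.length_cons, List.length_drop]
  all_goals try omega
  · have := strScanA_snd_le r; omega
  · have hap := atomScanA_append (c :: r)
    have hl := congrArg List.length hap
    simp only [List.length_append, List.length_cons] at hl
    rename_i hne
    cases hh : (atomScanA (c :: r)).1 with
    | nil => exact absurd hh hne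
    | cons x xs => rw [hh] at hl; simp only [List.length_cons] at hl; omega

def tokenize_sbpl_py (text : String) : List String := tokA text.toList false false

-- ===== PORT B =====
-- B-side scanners used by the rules
def blockEndB : List Char → List Char × List Char
  | [] => ([], [])
  | c :: r =>
    if c == '|' && r.head? == some '#' then ([c, '#'], r.drop 1)
    else (c :: (blockEndB r).1, (blockEndB r).2)

def lineEndB : List Char → List Char × List Char
  | [] => ([], [])
  | c :: r => if c == '\n' then ([c], r) else (c :: (lineEndB r).1, (lineEndB r).2)

def strScanB : List Char → List Char × List Char
  | [] => ([], [])
  | c :: r =>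
    if c == '\\' then
      match r with
      | [] => (['\\'], [])
      | c2 :: r2 => ('\\' :: c2 :: (strScanB r2).1, (strScanB r2).2)
    else if c == '"' then (['"'], r)
    else (c :: (strScanB r).1, (strScanB r).2)

def atomScanB : List Char → List Char × List Char
  | [] => ([], [])
  | c :: r =>
    if PySem.Chars.isspace c || c == '(' || c == ')' || c == ';' then ([], c :: r)
    else if c == '#' && r.head? == some '|' then ([], c :: r)
    else (c :: (atomScanB r).1, (atomScanB r).2)

-- the six ordered matcher rules: each returns (matched chars, rest) or none
def matchBlockB (cs : List Char) : Option (List Char × List Char) :=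
  if cs.head? == some '#' && cs.tail.head? == some '|' then
    some ('#' :: '|' :: (blockEndB cs.tail.tail).1, (blockEndB cs.tail.tail).2)
  else none

def matchLineB (cs : List Char) : Option (List Char × List Char) :=
  if cs.head? == some ';' then some (';' :: (lineEndB cs.tail).1, (lineEndB cs.tail).2)
  else none

def matchSpaceB : List Char → Option (List Char × List Char)
  | [] => none
  | c :: r => if PySem.Chars.isspace c then some ([c], r) else none

def matchParenB : List Char → Option (List Char × List Char)
  | [] => none
  | c :: r => if c == '(' || c == ')' then some ([c], r) else none

def matchStringB (cs : List Char) : Option (List Char × List Char) :=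
  if cs.head? == some '"' then some ('"' :: (strScanB cs.tail).1, (strScanB cs.tail).2)
  else none

def matchAtomB (cs : List Char) : Option (List Char × List Char) :=
  if (atomScanB cs).1 = [] then none else some (atomScanB cs)

-- the ordered rule table, with the emit flag
def rulesB : List ((List Char → Option (List Char × List Char)) × Bool) :=
  [(matchBlockB, false), (matchLineB, false), (matchSpaceB, false),
   (matchParenB, true), (matchStringB, true), (matchAtomB, true)]

def firstMatchB : List ((List Char → Option (List Char × List Char)) × Bool) → List Char →
    Option (List Char × List Char × Bool)
  | [], _ => none
  | (m, e) :: rs, cs =>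
    match m cs with
    | some (t, rest) => some (t, rest, e)
    | none => firstMatchB rs cs

theorem blockEndB_append : ∀ cs : List Char, (blockEndB cs).1 ++ (blockEndB cs).2 = cs := by
  intro cs
  fun_induction blockEndB cs with
  | case1 => simp
  | case2 c r h =>
    simp [Bool.and_eq_true, beq_iff_eq] at h
    obtain ⟨hc, hh⟩ := h
    cases r with
    | nil => simp at hh
    | cons x xs => simp at hh; simp [hc, hh]
  | case3 c r h ih => simp [ih]

theorem lineEndB_append : ∀ cs : List Char, (lineEndB cs).1 ++ (lineEndB cs).2 = cs := by
  intro cs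
  fun_induction lineEndB cs <;> simp_all

theorem strScanB_append : ∀ cs : List Char, (strScanB cs).1 ++ (strScanB cs).2 = cs := by
  intro cs
  fun_induction strScanB cs <;> simp_all

theorem atomScanB_append : ∀ cs : List Char, (atomScanB cs).1 ++ (atomScanB cs).2 = cs := by
  intro cs
  fun_induction atomScanB cs <;> simp_all

-- each rule's match is a nonempty prefix, so the rest is strictly shorter
theorem matchBlockB_spec (cs t rest : List Char) (hm : matchBlockB cs = some (t, rest)) :
    t ++ rest = cs ∧ t ≠ [] := by
  unfold matchBlockB at hm
  split_ifs at hm with hcond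
  simp only [Option.some.injEq, Prod.mk.injEq] at hm
  obtain ⟨ht, hr⟩ := hm
  simp only [Bool.and_eq_true, beq_iff_eq] at hcond
  obtain ⟨h1, h2⟩ := hcond
  cases cs with
  | nil => simp at h1
  | cons a as =>
    simp only [List.head?_cons, Option.some.injEq] at h1
    cases as with
    | nil => simp at h2
    | cons b bs =>
      simp only [List.tail_cons, List.head?_cons, Option.some.injEq] at h2
      subst h1 h2 ht hr
      refine ⟨?_, by simp⟩
      simpa using blockEndB_append bs

theorem matchLineB_spec (cs t rest : List Char) (hm : matchLineB cs = some (t, rest)) :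
    t ++ rest = cs ∧ t ≠ [] := by
  unfold matchLineB at hm
  split_ifs at hm with hcond
  simp only [Option.some.injEq, Prod.mk.injEq] at hm
  obtain ⟨ht, hr⟩ := hm
  simp only [beq_iff_eq] at hcond
  cases cs with
  | nil => simp at hcond
  | cons a as =>
    simp only [List.head?_cons, Option.some.injEq] at hcond
    subst hcond ht hr
    refine ⟨?_, by simp⟩
    simpa using lineEndB_append as

theorem matchSpaceB_spec (cs t rest : List Char) (hm : matchSpaceB cs = some (t, rest)) :
    t ++ rest = cs ∧ t ≠ [] := by
  cases cs with
  | nil => simp [matchSpaceB] at hm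
  | cons a as =>
    simp only [matchSpaceB] at hm
    split_ifs at hm
    simp only [Option.some.injEq, Prod.mk.injEq] at hm
    obtain ⟨ht, hr⟩ := hm
    subst ht hr
    exact ⟨rfl, by simp⟩

theorem matchParenB_spec (cs t rest : List Char) (hm : matchParenB cs = some (t, rest)) :
    t ++ rest = cs ∧ t ≠ [] := by
  cases cs with
  | nil => simp [matchParenB] at hm
  | cons a as =>
    simp only [matchParenB] at hm
    split_ifs at hm
    simp only [Option.some.injEq, Prod.mk.injEq] at hm
    obtain ⟨ht, hr⟩ := hm
    subst ht hr
    exact ⟨rfl, by simp⟩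

theorem matchStringB_spec (cs t rest : List Char) (hm : matchStringB cs = some (t, rest)) :
    t ++ rest = cs ∧ t ≠ [] := by
  unfold matchStringB at hm
  split_ifs at hm with hcond
  simp only [Option.some.injEq, Prod.mk.injEq] at hm
  obtain ⟨ht, hr⟩ := hm
  simp only [beq_iff_eq] at hcond
  cases cs with
  | nil => simp at hcond
  | cons a as =>
    simp only [List.head?_cons, Option.some.injEq] at hcond
    subst hcond ht hr
    refine ⟨?_, by simp⟩
    simpa using strScanB_append as

theorem matchAtomB_spec (cs t rest : List Char) (hm : matchAtomB cs = some (t, rest)) :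
    t ++ rest = cs ∧ t ≠ [] := by
  unfold matchAtomB at hm
  split_ifs at hm with hcond
  simp only [Option.some.injEq] at hm
  refine ⟨?_, ?_⟩
  · have := atomScanB_append cs
    rw [hm] at this
    exact this
  · rw [hm] at hcond
    simpa using hcond

theorem firstMatchB_rest_lt (cs : List Char) (t rest : List Char) (e : Bool)
    (hne : cs ≠ []) (h : firstMatchB rulesB cs = some (t, rest, e)) :
    rest.length < cs.length := by
  have spec : t ++ rest = cs ∧ t ≠ [] := by
    simp only [rulesB, firstMatchB] at h
    cases h1 : matchBlockB cs with
    | some p =>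
      rw [h1] at h
      obtain ⟨p1, p2⟩ := p
      simp only [Option.some.injEq, Prod.mk.injEq] at h
      obtain ⟨e1, e2, _⟩ := h
      exact e1 ▸ e2 ▸ matchBlockB_spec cs p1 p2 h1
    | none =>
    rw [h1] at h
    cases h2 : matchLineB cs with
    | some p =>
      rw [h2] at h
      obtain ⟨p1, p2⟩ := p
      simp only [Option.some.injEq, Prod.mk.injEq] at h
      obtain ⟨e1, e2, _⟩ := h
      exact e1 ▸ e2 ▸ matchLineB_spec cs p1 p2 h2
    | none =>
    rw [h2] at h
    cases h3 : matchSpaceB cs with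
    | some p =>
      rw [h3] at h
      obtain ⟨p1, p2⟩ := p
      simp only [Option.some.injEq, Prod.mk.injEq] at h
      obtain ⟨e1, e2, _⟩ := h
      exact e1 ▸ e2 ▸ matchSpaceB_spec cs p1 p2 h3
    | none =>
    rw [h3] at h
    cases h4 : matchParenB cs with
    | some p =>
      rw [h4] at h
      obtain ⟨p1, p2⟩ := p
      simp only [Option.some.injEq, Prod.mk.injEq] at h
      obtain ⟨e1, e2, _⟩ := h
      exact e1 ▸ e2 ▸ matchParenB_spec cs p1 p2 h4
    | none =>
    rw [h4] at h
    cases h5 : matchStringB cs with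
    | some p =>
      rw [h5] at h
      obtain ⟨p1, p2⟩ := p
      simp only [Option.some.injEq, Prod.mk.injEq] at h
      obtain ⟨e1, e2, _⟩ := h
      exact e1 ▸ e2 ▸ matchStringB_spec cs p1 p2 h5
    | none =>
    rw [h5] at h
    cases h6 : matchAtomB cs with
    | some p =>
      rw [h6] at h
      obtain ⟨p1, p2⟩ := p
      simp only [Option.some.injEq, Prod.mk.injEq] at h
      obtain ⟨e1, e2, _⟩ := h
      exact e1 ▸ e2 ▸ matchAtomB_spec cs p1 p2 h6
    | none => rw [h6] at h; simp at h
  obtain ⟨hap, hne'⟩ := spec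
  have := congrArg List.length hap
  simp only [List.length_append] at this
  cases t with
  | nil => exact absurd rfl hne'
  | cons x xs => simp only [List.length_cons] at this; omega

-- B's main loop: apply the first matching rule, emit if token-producing
def tokB (cs : List Char) : List String :=
  if hne : cs = [] then []
  else
    match hm : firstMatchB rulesB cs with
    | some (t, rest, e) => if e then String.ofList t :: tokB rest else tokB rest
    | none => []   -- unreachable: some rule always matches a nonempty input
termination_by cs.length
decreasing_by
  all_goals exact firstMatchB_rest_lt cs t rest e hne hm

def tokenize_sbpl_py_alt (text : String) : List String := tokB text.toList

-- ===== PRECONDITION & SPEC =====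
def Spec_tokenize_sbpl_py (text : String) (out : List String) : Prop := out = tokenize_sbpl_py_alt text
instance (text : String) (out : List String) : Decidable (Spec_tokenize_sbpl_py text out) := by unfold Spec_tokenize_sbpl_py; infer_instance

-- ===== CLAIM (what is proved, stated in full; the proofs are below) =====
def Claim_equal_tokenize_sbpl_py : Prop := ∀ (text : String), Dom_tokenize_sbpl_py text → Spec_tokenize_sbpl_py text (tokenize_sbpl_py text)

-- ===== LEMMAS AND PROOFS =====

theorem atomScanA_snd_le (cs : List Char) : (atomScanA cs).2.length ≤ cs.length := by
  have h := atomScanA_append cs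
  have := congrArg List.length h
  simp [List.length_append] at this
  omega


theorem strScanB_eq (cs : List Char) : strScanB cs = strScanA cs := by
  fun_induction strScanB cs <;> (conv_rhs => rw [strScanA.eq_def]) <;> simp_all

theorem atomScanB_eq (cs : List Char) : atomScanB cs = atomScanA cs := by
  fun_induction atomScanB cs <;> (conv_rhs => rw [atomScanA.eq_def]) <;> simp_all

theorem tokB_eq_some (c : Char) (r t rest : List Char) (e : Bool)
    (h : firstMatchB rulesB (c :: r) = some (t, rest, e)) :
    tokB (c :: r) = if e then String.ofList t :: tokB rest else tokB rest := by
  rw [tokB]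
  rw [dif_neg (by simp : ¬ (c :: r) = [])]
  split
  · rename_i t' rest' e' heq
    rw [h] at heq
    injection heq with h1
    injection h1 with ht h2
    injection h2 with hr he
    subst ht hr he
    rfl
  · rename_i heq
    rw [h] at heq
    exact absurd heq (by simp)

theorem tokB_nil : tokB [] = [] := by rw [tokB]; simp

-- main simultaneous invariant: A with flags (no comment / line comment / block comment)
-- equals B on the corresponding remaining text
theorem tok_main : ∀ (n : ℕ) (cs : List Char), cs.length ≤ n →
    (tokA cs false false = tokB cs) ∧
    (tokA cs true false = tokB (lineEndB cs).2) ∧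
    (tokA cs false true = tokB (blockEndB cs).2) := by
  intro n
  induction n with
  | zero =>
    intro cs h
    have : cs = [] := List.eq_nil_of_length_eq_zero (Nat.le_zero.mp h)
    subst this
    simp [tokA, tokB_nil, lineEndB, blockEndB]
  | succ n ih =>
    intro cs h
    cases cs with
    | nil => simp [tokA, tokB_nil, lineEndB, blockEndB]
    | cons c r =>
      simp only [List.length_cons, Nat.succ_le_succ_iff] at h
      refine ⟨?_, ?_, ?_⟩
      · -- S1 : no comment state
        by_cases hb : c = '#' ∧ r.head? = some '|'
        · obtain ⟨hc1, hc2⟩ := hb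
          cases r with
          | nil => simp at hc2
          | cons x xs =>
            simp only [List.head?_cons, Option.some.injEq] at hc2
            subst hc1 hc2
            have e1 : tokA ('#' :: '|' :: xs) false false = tokA xs false true := by
              simp [tokA]
            have hfm : firstMatchB rulesB ('#' :: '|' :: xs) =
                some ('#' :: '|' :: (blockEndB xs).1, (blockEndB xs).2, false) := by
              simp [firstMatchB, rulesB, matchBlockB]
            rw [e1, tokB_eq_some _ _ _ _ _ hfm, if_neg Bool.false_ne_true]
            exact (ih xs (by simpa using Nat.le_of_succ_le (by simpa using h))).2.2
        · have hb' : (c == '#' && r.head? == some '|') = false := by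
            rcases not_and_or.mp hb with h1 | h1 <;> simp [h1] <;>
              intro hx <;> simp_all
          have hblock : matchBlockB (c :: r) = none := by
            simp only [matchBlockB, List.head?_cons, List.tail_cons]
            rw [if_neg]
            simp only [Bool.and_eq_true, beq_iff_eq]
            rintro ⟨hx, hy⟩
            exact hb ⟨Option.some.inj hx, hy⟩
          by_cases hs : PySem.Chars.isspace c = true
          · have hsc : c ≠ ';' := by rintro rfl; simp [PySem.Chars.isspace] at hs
            have hl : matchLineB (c :: r) = none := by simp [matchLineB, hsc]
            have e1 : tokA (c :: r) false false = tokA r false false := by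
              simp [tokA, hb', hs]
            have hfm : firstMatchB rulesB (c :: r) = some ([c], r, false) := by
              simp [firstMatchB, rulesB, hblock, hl, matchSpaceB, hs]
            rw [e1, tokB_eq_some _ _ _ _ _ hfm, if_neg Bool.false_ne_true]
            exact (ih r h).1
          · have hs' : PySem.Chars.isspace c = false := by simpa using hs
            have hsp : matchSpaceB (c :: r) = none := by simp [matchSpaceB, hs']
            by_cases hsc : c = ';'
            · subst hsc
              have e1 : tokA (';' :: r) false false = tokA r true false := by
                simp [tokA, hb', hs']
              have hfm : firstMatchB rulesB (';' :: r) =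
                  some (';' :: (lineEndB r).1, (lineEndB r).2, false) := by
                simp [firstMatchB, rulesB, hblock, hsp, matchLineB]
              rw [e1, tokB_eq_some _ _ _ _ _ hfm, if_neg Bool.false_ne_true]
              exact (ih r h).2.1
            · have hl : matchLineB (c :: r) = none := by simp [matchLineB, hsc]
              by_cases hp : c = '(' ∨ c = ')'
              · have hp' : (c == '(' || c == ')') = true := by
                  rcases hp with h1 | h1 <;> simp [h1]
                have e1 : tokA (c :: r) false false =
                    String.ofList [c] :: tokA r false false := by
                  simp [tokA, hb', hs', hsc, hp']
                have hfm : firstMatchB rulesB (c :: r) = some ([c], r, true) := by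
                  simp [firstMatchB, rulesB, hblock, hl, hsp, matchParenB, hp']
                rw [e1, tokB_eq_some _ _ _ _ _ hfm, if_pos rfl]
                exact congrArg _ (ih r h).1
              · have hp1 : c ≠ '(' := fun hx => hp (Or.inl hx)
                have hp2 : c ≠ ')' := fun hx => hp (Or.inr hx)
                have hpar : matchParenB (c :: r) = none := by
                  simp [matchParenB, hp1, hp2]
                by_cases hq : c = '"'
                · subst hq
                  have e1 : tokA ('"' :: r) false false =
                      String.ofList ('"' :: (strScanA r).1) ::
                        tokA (strScanA r).2 false false := by
                    simp [tokA, hb', hs', hsc, hp1, hp2]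
                  have hfm : firstMatchB rulesB ('"' :: r) =
                      some ('"' :: (strScanA r).1, (strScanA r).2, true) := by
                    simp [firstMatchB, rulesB, hblock, hl, hsp, hpar, matchStringB,
                      strScanB_eq]
                  rw [e1, tokB_eq_some _ _ _ _ _ hfm, if_pos rfl]
                  exact congrArg _ (ih (strScanA r).2 (le_trans (strScanA_snd_le r) h)).1
                · have hstr : matchStringB (c :: r) = none := by simp [matchStringB, hq]
                  have hscan : atomScanA (c :: r) =
                      (c :: (atomScanA r).1, (atomScanA r).2) := by
                    rw [atomScanA.eq_def]
                    simp [hs', hp1, hp2, hsc, hb']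
                  have e1 : tokA (c :: r) false false =
                      String.ofList (c :: (atomScanA r).1) ::
                        tokA (atomScanA r).2 false false := by
                    simp [tokA, hb', hs', hsc, hp1, hp2, hq, hscan]
                  have hfm : firstMatchB rulesB (c :: r) =
                      some (c :: (atomScanA r).1, (atomScanA r).2, true) := by
                    simp [firstMatchB, rulesB, hblock, hl, hsp, hpar, hstr, matchAtomB,
                      atomScanB_eq, hscan]
                  rw [e1, tokB_eq_some _ _ _ _ _ hfm, if_pos rfl]
                  exact congrArg _ (ih (atomScanA r).2 (le_trans (atomScanA_snd_le r) h)).1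
      · -- S2 : inside a line comment
        by_cases hc : c = '\n'
        · subst hc
          have e1 : tokA ('\n' :: r) true false = tokA r false false := by simp [tokA]
          have e2 : (lineEndB ('\n' :: r)).2 = r := by simp [lineEndB]
          rw [e1, e2]
          exact (ih r h).1
        · have hcb : (c == '\n') = false := by simp [hc]
          have e1 : tokA (c :: r) true false = tokA r true false := by simp [tokA, hcb]
          have e2 : (lineEndB (c :: r)).2 = (lineEndB r).2 := by simp [lineEndB, hc]
          rw [e1, e2]
          exact (ih r h).2.1
      · -- S3 : inside a block comment
        by_cases hc : (c == '|' && r.head? == some '#') = true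
        · have e1 : tokA (c :: r) false true = tokA (r.drop 1) false false := by
            simp [tokA, hc]
          have e2 : (blockEndB (c :: r)).2 = r.drop 1 := by simp [blockEndB, hc]
          rw [e1, e2]
          exact (ih (r.drop 1) (le_trans (by simpa using List.length_drop_le 1 r) h)).1
        · have hc' : (c == '|' && r.head? == some '#') = false := by simpa using hc
          have e1 : tokA (c :: r) false true = tokA r false true := by simp [tokA, hc']
          have e2 : (blockEndB (c :: r)).2 = (blockEndB r).2 := by simp [blockEndB, hc']
          rw [e1, e2]
          exact (ih r h).2.2

-- ===== VERDICT (by name: the statement is the Claim_ definition above) =====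
theorem tokenize_sbpl_py_spec : Claim_equal_tokenize_sbpl_py := by
  intro text _
  unfold Spec_tokenize_sbpl_py tokenize_sbpl_py tokenize_sbpl_py_alt
  exact (tok_main text.toList.length text.toList le_rfl).1
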